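-- pv_equiv track=rewrite | github.com/aimansalim/outfits | tools/build_manifest.py | detect_color_hints
-- ===== SOURCE A (Python) =====
-- COLOR_KEYWORDS = [
--     "black",
--     "white",
--     "navy",
--     "beige",
--     "green",
--     "brown",
--     "denim",
--     "blue",
--     "grey",
--     "gray",
--     "tan",
--     "cream",
--     "khaki",
--     "olive",
--     "red",
--     "yellow",
--     "purple",
--     "orange",
-- ]
--
-- def detect_color_hints(tokens: list[str]) -> list[str]:
--     colors: set[str] = set()
--     for c in COLOR_KEYWORDS:
--         if c in tokens:
--             colors.add(c)
--     # Normalize gray/grey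
--     if "gray" in colors or "grey" in colors:
--         colors.add("grey")
--         colors.discard("gray")
--     return sorted(colors)
-- ===== SOURCE B (Python) =====
-- COLOR_KEYWORDS = [
--     "black",
--     "white",
--     "navy",
--     "beige",
--     "green",
--     "brown",
--     "denim",
--     "blue",
--     "grey",
--     "gray",
--     "tan",
--     "cream",
--     "khaki",
--     "olive",
--     "red",
--     "yellow",
--     "purple",
--     "orange",
-- ]
--
-- KEYWORD_SET = set(COLOR_KEYWORDS)
--
-- def detect_color_hints(tokens: list[str]) -> list[str]:
--     colors: set[str] = set()
--     for t in tokens: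
--         if t in KEYWORD_SET:
--             colors.add("grey" if t == "gray" else t)
--     return sorted(colors)
-- ===== Notes on version B (the rewrite author's own statement) =====
-- stated objective: faster
-- what changed: Instead of scanning the token list once per keyword (18 list scans) plus a gray/grey fix-up pass, B makes a single pass over tokens against a prebuilt keyword set and normalizes gray to grey as it inserts.
import Mathlib
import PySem

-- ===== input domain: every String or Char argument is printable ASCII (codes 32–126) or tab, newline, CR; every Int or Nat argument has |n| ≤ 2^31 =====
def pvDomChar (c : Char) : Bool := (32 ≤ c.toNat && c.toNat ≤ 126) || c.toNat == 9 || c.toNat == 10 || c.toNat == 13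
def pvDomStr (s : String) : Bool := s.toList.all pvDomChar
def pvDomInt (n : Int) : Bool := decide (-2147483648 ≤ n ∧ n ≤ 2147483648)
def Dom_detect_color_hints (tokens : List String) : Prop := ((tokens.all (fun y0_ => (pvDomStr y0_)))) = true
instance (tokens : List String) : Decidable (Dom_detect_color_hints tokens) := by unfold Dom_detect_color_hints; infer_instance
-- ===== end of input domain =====

-- B replaces A's 18 scans of the token list (one per keyword) by ONE pass over tokens
-- against a prebuilt keyword set, normalizing "gray"→"grey" as it inserts; return value only.

-- ===== PORT A =====
def colorKeywords : List String :=
  ["black", "white", "navy", "beige", "green", "brown", "denim", "blue", "grey",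
   "gray", "tan", "cream", "khaki", "olive", "red", "yellow", "purple", "orange"]

def detect_color_hints (tokens : List String) : List String :=
  let colors : PySem.Set String :=
    colorKeywords.foldl (fun s c => if tokens.contains c then PySem.Set.add s c else s)
      PySem.Set.empty
  let colors :=
    if PySem.Set.contains colors "gray" || PySem.Set.contains colors "grey" then
      PySem.Set.discard (PySem.Set.add colors "grey") "gray"
    else colors
  PySem.List.sorted colors (fun x => x) false

-- ===== PORT B =====
def keywordSet : PySem.Set String := PySem.Set.ofList colorKeywords

def detect_color_hints_alt (tokens : List String) : List String :=
  let colors : PySem.Set String :=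
    tokens.foldl
      (fun s t => if PySem.Set.contains keywordSet t then
                    PySem.Set.add s (if t = "gray" then "grey" else t)
                  else s)
      PySem.Set.empty
  PySem.List.sorted colors (fun x => x) false

-- ===== PRECONDITION & SPEC =====
def Spec_detect_color_hints (tokens : List String) (out : List String) : Prop := out = detect_color_hints_alt tokens
instance (tokens : List String) (out : List String) : Decidable (Spec_detect_color_hints tokens out) := by unfold Spec_detect_color_hints; infer_instance

-- ===== CLAIM (what is proved, stated in full; the proofs are below) =====
def Claim_equal_detect_color_hints : Prop := ∀ (tokens : List String), Dom_detect_color_hints tokens → Spec_detect_color_hints tokens (detect_color_hints tokens)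

-- ===== LEMMAS AND PROOFS =====

-- A's keyword loop: membership of the accumulated set
theorem memA (tokens : List String) (ks : List String) (s0 : PySem.Set String) (x : String) :
    x ∈ ks.foldl (fun s c => if tokens.contains c then PySem.Set.add s c else s) s0 ↔
      x ∈ s0 ∨ (x ∈ ks ∧ x ∈ tokens) := by
  induction ks generalizing s0 with
  | nil => simp
  | cons c ks ih =>
    simp only [List.foldl_cons, ih]
    by_cases hc : tokens.contains c
    · have hc' : c ∈ tokens := by simpa using hc
      simp only [hc, if_pos, PySem.Set.mem_add]
      constructor
      · rintro (⟨h | rfl⟩ | h)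
        · exact .inl h
        · exact .inr ⟨List.mem_cons_self, hc'⟩
        · exact .inr ⟨List.mem_cons_of_mem _ h.1, h.2⟩
      · rintro (h | ⟨hm, ht⟩)
        · exact .inl (.inl h)
        · rcases List.mem_cons.mp hm with rfl | hm
          · exact .inl (.inr rfl)
          · exact .inr ⟨hm, ht⟩
    · have hc' : ¬ c ∈ tokens := by simpa using hc
      simp only [Bool.not_eq_true] at hc
      simp only [hc]
      constructor
      · rintro (h | h)
        · exact .inl h
        · exact .inr ⟨List.mem_cons_of_mem _ h.1, h.2⟩
      · rintro (h | ⟨hm, ht⟩)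
        · exact .inl h
        · rcases List.mem_cons.mp hm with rfl | hm
          · exact absurd ht hc'
          · exact .inr ⟨hm, ht⟩

theorem nodupA (tokens : List String) (ks : List String) (s0 : PySem.Set String)
    (h : s0.Nodup) :
    (ks.foldl (fun s c => if tokens.contains c then PySem.Set.add s c else s) s0).Nodup := by
  induction ks generalizing s0 with
  | nil => simpa using h
  | cons c ks ih =>
    simp only [List.foldl_cons]
    by_cases hc : tokens.contains c
    · simp only [hc, if_pos]; exact ih _ (PySem.Set.nodup_add s0 c h)
    · simp only [Bool.not_eq_true] at hc; simp only [hc]; exact ih _ h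

-- B's token loop: membership of the accumulated set
theorem memB (ts : List String) (s0 : PySem.Set String) (x : String) :
    x ∈ ts.foldl
        (fun s t => if PySem.Set.contains keywordSet t then
                      PySem.Set.add s (if t = "gray" then "grey" else t)
                    else s) s0 ↔
      x ∈ s0 ∨ ∃ t ∈ ts, t ∈ colorKeywords ∧ x = (if t = "gray" then "grey" else t) := by
  induction ts generalizing s0 with
  | nil => simp
  | cons t ts ih =>
    simp only [List.foldl_cons, ih]
    by_cases hk : PySem.Set.contains keywordSet t
    · have hk' : t ∈ colorKeywords := by
        have := (PySem.Set.contains_iff keywordSet t).mp hk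
        simpa [keywordSet, PySem.Set.mem_ofList] using this
      simp only [hk, if_pos, PySem.Set.mem_add]
      constructor
      · rintro (⟨h | rfl⟩ | ⟨u, hu, hku, hxu⟩)
        · exact .inl h
        · exact .inr ⟨t, List.mem_cons_self, hk', rfl⟩
        · exact .inr ⟨u, List.mem_cons_of_mem _ hu, hku, hxu⟩
      · rintro (h | ⟨u, hu, hku, hxu⟩)
        · exact .inl (.inl h)
        · rcases List.mem_cons.mp hu with rfl | hu
          · exact .inl (.inr hxu)
          · exact .inr ⟨u, hu, hku, hxu⟩
    · have hk' : t ∉ colorKeywords := by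
        intro hmem
        exact hk ((PySem.Set.contains_iff keywordSet t).mpr
          (by simpa [keywordSet, PySem.Set.mem_ofList] using hmem))
      simp only [Bool.not_eq_true] at hk
      simp only [hk]
      constructor
      · rintro (h | ⟨u, hu, hku, hxu⟩)
        · exact .inl h
        · exact .inr ⟨u, List.mem_cons_of_mem _ hu, hku, hxu⟩
      · rintro (h | ⟨u, hu, hku, hxu⟩)
        · exact .inl h
        · rcases List.mem_cons.mp hu with rfl | hu
          · exact absurd hku hk'
          · exact .inr ⟨u, hu, hku, hxu⟩

theorem nodupB (ts : List String) (s0 : PySem.Set String) (h : s0.Nodup) :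
    (ts.foldl
        (fun s t => if PySem.Set.contains keywordSet t then
                      PySem.Set.add s (if t = "gray" then "grey" else t)
                    else s) s0).Nodup := by
  induction ts generalizing s0 with
  | nil => simpa using h
  | cons t ts ih =>
    simp only [List.foldl_cons]
    by_cases hk : PySem.Set.contains keywordSet t
    · simp only [hk, if_pos]; exact ih _ (PySem.Set.nodup_add _ _ h)
    · simp only [Bool.not_eq_true] at hk; simp only [hk]; exact ih _ h

-- A's gray/grey normalization step, characterized by membership
theorem mem_norm (s : PySem.Set String) (x : String) :
    x ∈ (if PySem.Set.contains s "gray" || PySem.Set.contains s "grey" then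
           PySem.Set.discard (PySem.Set.add s "grey") "gray"
         else s) ↔
      (x ∈ s ∨ (x = "grey" ∧ "gray" ∈ s)) ∧ x ≠ "gray" := by
  have e1 : PySem.Set.contains s "gray" = decide ("gray" ∈ s) := by
    by_cases hm : "gray" ∈ s <;> simp [hm]
  have e2 : PySem.Set.contains s "grey" = decide ("grey" ∈ s) := by
    by_cases hm : "grey" ∈ s <;> simp [hm]
  rw [e1, e2]
  by_cases h1 : "gray" ∈ s <;> by_cases h2 : "grey" ∈ s <;>
    simp only [h1, h2, decide_true, decide_false, Bool.or_true, Bool.or_false,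
      if_true, PySem.Set.mem_discard, PySem.Set.mem_add] <;>
    constructor
  · rintro ⟨h | rfl, hg⟩ <;> tauto
  · rintro ⟨h | ⟨rfl, _⟩, hg⟩ <;> tauto
  · rintro ⟨h | rfl, hg⟩ <;> tauto
  · rintro ⟨h | ⟨rfl, _⟩, hg⟩ <;> tauto
  · rintro ⟨h | rfl, hg⟩ <;> tauto
  · rintro ⟨h | ⟨rfl, _⟩, hg⟩ <;> tauto
  · intro h
    have hxg : x ≠ "gray" := by rintro rfl; exact h1 h
    tauto
  · rintro ⟨h, _⟩
    tauto

theorem nodup_norm (s : PySem.Set String) (h : s.Nodup) :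
    (if PySem.Set.contains s "gray" || PySem.Set.contains s "grey" then
       PySem.Set.discard (PySem.Set.add s "grey") "gray"
     else s).Nodup := by
  split_ifs with hc
  · exact PySem.Set.nodup_discard _ _ (PySem.Set.nodup_add _ _ h)
  · exact h

-- ===== VERDICT (by name: the statement is the Claim_ definition above) =====
theorem detect_color_hints_spec : Claim_equal_detect_color_hints := by
  intro tokens _
  unfold Spec_detect_color_hints detect_color_hints detect_color_hints_alt
  set sA := colorKeywords.foldl
      (fun s c => if tokens.contains c then PySem.Set.add s c else s) PySem.Set.empty with hsA
  set sB := tokens.foldl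
      (fun s t => if PySem.Set.contains keywordSet t then
                    PySem.Set.add s (if t = "gray" then "grey" else t)
                  else s) PySem.Set.empty with hsB
  have hAmem : ∀ x, x ∈ sA ↔ x ∈ colorKeywords ∧ x ∈ tokens := by
    intro x; rw [hsA, memA]; simp [PySem.Set.empty]
  have hAnodup : sA.Nodup := nodupA tokens _ _ (by simp [PySem.Set.empty])
  have hBmem : ∀ x, x ∈ sB ↔
      ∃ t ∈ tokens, t ∈ colorKeywords ∧ x = (if t = "gray" then "grey" else t) := by
    intro x; rw [hsB, memB]; simp [PySem.Set.empty]
  have hBnodup : sB.Nodup := nodupB _ _ (by simp [PySem.Set.empty])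
  have hgrayk : "gray" ∈ colorKeywords := by decide
  have hFmem : ∀ x,
      x ∈ (if PySem.Set.contains sA "gray" || PySem.Set.contains sA "grey" then
             PySem.Set.discard (PySem.Set.add sA "grey") "gray"
           else sA) ↔ x ∈ sB := by
    intro x
    rw [mem_norm, hBmem]
    constructor
    · rintro ⟨hmem | ⟨rfl, hg⟩, hxg⟩
      · rcases (hAmem x).mp hmem with ⟨hxk, hxt⟩
        exact ⟨x, hxt, hxk, by simp [hxg]⟩
      · exact ⟨"gray", ((hAmem "gray").mp hg).2, hgrayk, by simp⟩
    · rintro ⟨t, ht, htk, hx⟩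
      by_cases hg : t = "gray"
      · subst hg; simp only [if_pos] at hx; subst hx
        exact ⟨.inr ⟨rfl, (hAmem "gray").mpr ⟨hgrayk, ht⟩⟩, by decide⟩
      · simp only [if_neg hg] at hx; subst hx
        exact ⟨.inl ((hAmem x).mpr ⟨htk, ht⟩), hg⟩
  have hperm := (List.perm_ext_iff_of_nodup (nodup_norm sA hAnodup) hBnodup).mpr hFmem
  exact (PySem.List.sorted_id_eq_sorted_id_iff_perm _ _).mpr hperm
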